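-- pv_equiv track=rewrite | github.com/lab-401/icopy-x | tools/pm3_fixtures.py | _rdsc_response
-- ===== SOURCE A (Python) =====
-- def _rdsc_response(sector=0, key_type='B', key='ffffffffffff'):
--     base_block = sector * 4
--     zero = '00 00 00 00 00 00 00 00 00 00 00 00 00 00 00 00'
--     trailer = 'FF FF FF FF FF FF FF 07 80 69 FF FF FF FF FF FF'
--     if sector == 0:
--         b0 = '2C AD C2 72 9C 4C 45 45 00 00 00 00 00 00 00 00'
--     else:
--         b0 = zero
--     key_hex = ' '.join(key[i:i+2].upper() for i in range(0, len(key), 2))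
--     lines = []
--     lines.append('--sector no %d, key %s - %s\n' % (sector, key_type, key_hex))
--     lines.append('\n')
--     lines.append('isOk:01\n')
--     # 16 blocks: block 0 = data/UID, blocks 1-14 = zeros, block 15 = trailer
--     lines.append('  %d | %s\n' % (base_block, b0))
--     for i in range(1, 15):
--         lines.append('  %d | %s\n' % (base_block + i, zero))
--     lines.append('  %d | %s\n' % (base_block + 15, trailer))
--     return ''.join(lines)
-- ===== SOURCE B (Python) =====
-- def _rdsc_response(sector=0, key_type='B', key='ffffffffffff'):
--     zero = '00 00 00 00 00 00 00 00 00 00 00 00 00 00 00 00'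
--     trailer = 'FF FF FF FF FF FF FF 07 80 69 FF FF FF FF FF FF'
--     uid = '2C AD C2 72 9C 4C 45 45 00 00 00 00 00 00 00 00'
--     # key hex: upper-case the whole key once, then chop it into 2-char pieces
--     parts = []
--     rest = key.upper()
--     while rest:
--         parts.append(rest[:2])
--         rest = rest[2:]
--     key_hex = ' '.join(parts)
--     # all 16 blocks up front, then one uniform formatting pass
--     blocks = [uid if sector == 0 else zero] + [zero] * 14 + [trailer]
--     head = '--sector no %d, key %s - %s\n\nisOk:01\n' % (sector, key_type, key_hex)
--     body = ''.join('  %d | %s\n' % (sector * 4 + i, b) for i, b in enumerate(blocks))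
--     return head + body
-- ===== Notes on version B (the rewrite author's own statement) =====
-- stated objective: simpler
-- what changed: B uppercases the key once and chops it into 2-char chunks instead of slicing-then-uppercasing per index, and replaces A's three special-cased block emissions (block 0, loop over 1-14, block 15) with one uniform formatting pass over a precomputed 16-element block list.
import Mathlib
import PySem

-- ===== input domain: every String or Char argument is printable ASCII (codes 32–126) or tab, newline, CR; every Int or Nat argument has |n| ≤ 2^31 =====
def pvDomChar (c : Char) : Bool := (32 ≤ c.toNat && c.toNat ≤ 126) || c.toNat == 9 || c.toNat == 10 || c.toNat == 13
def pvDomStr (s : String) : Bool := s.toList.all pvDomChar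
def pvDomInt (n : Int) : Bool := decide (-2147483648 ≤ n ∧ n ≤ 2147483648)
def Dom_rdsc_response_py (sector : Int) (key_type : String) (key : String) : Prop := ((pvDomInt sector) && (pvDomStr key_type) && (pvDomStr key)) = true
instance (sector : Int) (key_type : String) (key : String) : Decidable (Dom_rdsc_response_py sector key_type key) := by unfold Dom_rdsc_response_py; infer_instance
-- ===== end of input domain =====

-- B restructures A: it uppercases the key once and chops it into 2-char chunks, and replaces
-- A's three special-cased block emissions (block 0, loop 1-14, block 15) by one uniform
-- enumerate pass over a precomputed 16-element block list (objective: simpler decomposition).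


-- ===== PORT A =====
-- literal transliteration of _rdsc_response: key_hex by slicing-then-uppercasing each 2-char
-- piece over range(0, len(key), 2); lines built by appends, with a separate block-0 line,
-- a for-loop over range(1, 15) for the zero blocks, and a separate trailer line.
def rdsc_response_py (sector : Int) (key_type : String) (key : String) : String :=
  let base_block : Int := sector * 4
  let zero := "00 00 00 00 00 00 00 00 00 00 00 00 00 00 00 00"
  let trailer := "FF FF FF FF FF FF FF 07 80 69 FF FF FF FF FF FF"
  let b0 := if sector == 0 then "2C AD C2 72 9C 4C 45 45 00 00 00 00 00 00 00 00" else zero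
  let key_hex := PySem.Str.join " "
    ((PySem.List.pyRange 0 (PySem.Str.len key) 2).map
      (fun i => PySem.Str.upper (PySem.Str.slice key (some i) (some (i + 2)))))
  let lines : List String :=
    ["--sector no " ++ PySem.Int.toStr sector ++ ", key " ++ key_type ++ " - " ++ key_hex ++ "\n",
     "\n",
     "isOk:01\n",
     "  " ++ PySem.Int.toStr base_block ++ " | " ++ b0 ++ "\n"]
  let lines := (PySem.List.pyRange 1 15 1).foldl
    (fun acc i => acc ++ ["  " ++ PySem.Int.toStr (base_block + i) ++ " | " ++ zero ++ "\n"]) lines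
  let lines := lines ++ ["  " ++ PySem.Int.toStr (base_block + 15) ++ " | " ++ trailer ++ "\n"]
  PySem.Str.join "" lines

-- ===== PORT B =====
-- B's while loop "chop two chars off the front of the uppercased key" as structural recursion
def pvChunk2 : List Char → List (List Char)
  | [] => []
  | [a] => [[a]]
  | a :: b :: rest => [a, b] :: pvChunk2 rest

def rdsc_response_py_alt (sector : Int) (key_type : String) (key : String) : String :=
  let zero := "00 00 00 00 00 00 00 00 00 00 00 00 00 00 00 00"
  let trailer := "FF FF FF FF FF FF FF 07 80 69 FF FF FF FF FF FF"
  let uid := "2C AD C2 72 9C 4C 45 45 00 00 00 00 00 00 00 00"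
  let key_hex := PySem.Str.join " "
    ((pvChunk2 (PySem.Str.upper key).toList).map String.ofList)
  let blocks : List String :=
    (if sector == 0 then uid else zero) :: List.replicate 14 zero ++ [trailer]
  let head := "--sector no " ++ PySem.Int.toStr sector ++ ", key " ++ key_type ++ " - "
                ++ key_hex ++ "\n\nisOk:01\n"
  let body := PySem.Str.join ""
    ((PySem.List.enumerate blocks).map
      (fun p => "  " ++ PySem.Int.toStr (sector * 4 + p.1) ++ " | " ++ p.2 ++ "\n"))
  head ++ body

-- ===== PRECONDITION & SPEC =====
def Spec_rdsc_response_py (sector : Int) (key_type : String) (key : String) (out : String) : Prop := out = rdsc_response_py_alt sector key_type key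
instance (sector : Int) (key_type : String) (key : String) (out : String) : Decidable (Spec_rdsc_response_py sector key_type key out) := by unfold Spec_rdsc_response_py; infer_instance

-- ===== CLAIM (what is proved, stated in full; the proofs are below) =====
def Claim_equal_rdsc_response_py : Prop := ∀ (sector : Int) (key_type : String) (key : String), Dom_rdsc_response_py sector key_type key → Spec_rdsc_response_py sector key_type key (rdsc_response_py sector key_type key)

-- ===== LEMMAS AND PROOFS =====

-- the index-free core: chunking by take/drop over a counting range equals pvChunk2-after-upper
theorem pv_chunk_aux (cs : List Char) :
    (List.range ((cs.length + 1) / 2)).map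
        (fun k => PySem.Chars.upper (List.take 2 (List.drop (2 * k) cs)))
      = pvChunk2 (PySem.Chars.upper cs) := by
  induction cs using pvChunk2.induct with
  | case1 => simp [pvChunk2, PySem.Chars.upper]
  | case2 a => simp [pvChunk2, PySem.Chars.upper]
  | case3 a b rest ih =>
    have hm : (((a :: b :: rest).length + 1) / 2) = (rest.length + 1) / 2 + 1 := by
      simp only [List.length_cons]; omega
    rw [hm, List.range_succ_eq_map, List.map_cons, List.map_map]
    have hdrop : ∀ k : Nat, List.drop (2 * Nat.succ k) (a :: b :: rest) = List.drop (2 * k) rest := by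
      intro k
      have : 2 * Nat.succ k = 2 * k + 1 + 1 := by omega
      rw [this, List.drop_succ_cons, List.drop_succ_cons]
    simp only [Function.comp_def, hdrop]
    rw [ih]
    simp [pvChunk2, PySem.Chars.upper]

-- A's per-piece "slice then uppercase" list equals B's "uppercase then chunk" list, at char level
theorem pv_keyhex_chars (cs : List Char) :
    (PySem.List.pyRange 0 (cs.length : Int) 2).map
        (fun i => PySem.Chars.upper (PySem.List.slice cs (some i) (some (i + 2))))
      = pvChunk2 (PySem.Chars.upper cs) := by
  rw [PySem.List.pyRange_of_pos _ _ (by norm_num : (0:Int) < 2)]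
  have hm : (if (0:Int) < (cs.length : Int) then ((( (cs.length : Int)) - 0 + 2 - 1) / 2).toNat else 0)
      = (cs.length + 1) / 2 := by
    split_ifs with h
    · omega
    · omega
  rw [hm, List.map_map]
  rw [← pv_chunk_aux cs]
  apply List.map_congr_left
  intro k hk
  simp only [Function.comp_def, zero_add]
  have h1 : (2 : Int) * (k : Int) = ((2 * k : Nat) : Int) := by push_cast; ring
  have h2 : ((2 * k : Nat) : Int) + 2 = ((2 * k + 2 : Nat) : Int) := by push_cast; ring
  rw [h1, h2, PySem.List.slice_natCast]
  have h3 : 2 * k + 2 - 2 * k = 2 := by omega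
  rw [h3]

theorem pv_keyhex (key : String) :
    PySem.Str.join " "
      ((PySem.List.pyRange 0 (PySem.Str.len key) 2).map
        (fun i => PySem.Str.upper (PySem.Str.slice key (some i) (some (i + 2)))))
    = PySem.Str.join " " ((pvChunk2 (PySem.Str.upper key).toList).map String.ofList) := by
  rw [← String.toList_inj]
  simp only [PySem.Str.toList_join, List.map_map, Function.comp_def, PySem.Str.toList_upper]
  rw [← pv_keyhex_chars key.toList]
  simp [PySem.Str.slice, PySem.Str.len, Function.comp_def]

-- ===== VERDICT (by name: the statement is the Claim_ definition above) =====
theorem rdsc_response_py_spec : Claim_equal_rdsc_response_py := by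
  intro sector key_type key _
  unfold Spec_rdsc_response_py rdsc_response_py rdsc_response_py_alt
  rw [pv_keyhex]
  rw [show PySem.List.pyRange 1 15 1 = [1,2,3,4,5,6,7,8,9,10,11,12,13,14] from by decide]
  simp only [List.foldl_cons, List.foldl_nil, List.replicate, PySem.List.enumerate_cons,
    PySem.List.enumerate_nil, List.map_cons, List.map_nil, List.cons_append, List.nil_append]
  rw [← String.toList_inj]
  simp [PySem.Str.toList_join, PySem.Chars.join, List.intercalate, String.toList_append]
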